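-- pv_equiv track=rewrite | github.com/caldi99/Learning-From-Network-Project | code/graph_convolutional_neural_network/dataset_converter_format.py | get_window_frequency_map
-- ===== SOURCE A (Python) =====
-- def get_window_frequency_map(windows):
--     """
--         This function compute the window-frequency map
--         windows :
--             Windows to use to compute the window-frequency map
--         return :
--             The window frequency map
--     """
--     window_frequency_map = {}
--     for window in windows:
--         appeared = set()
--         for i in range(len(window)):
--             if window[i] in appeared:
--                 continue
--             if window[i] in window_frequency_map:
--                 window_frequency_map[window[i]] += 1
--             else:
--                 window_frequency_map[window[i]] = 1
--             appeared.add(window[i])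
--     return window_frequency_map
-- ===== SOURCE B (Python) =====
-- def get_window_frequency_map(windows):
--     """Inverted-index version: map each word to the set of window indices
--     containing it, then return the lengths of those sets."""
--     word_to_windows = {}
--     for index, window in enumerate(windows):
--         for word in window:
--             word_to_windows.setdefault(word, set()).add(index)
--     return {word: len(indices) for word, indices in word_to_windows.items()}
-- ===== Notes on version B (the rewrite author's own statement) =====
-- stated objective: alternative
-- what changed: Replaces A's running per-word counts with per-window 'appeared' dedup sets by an inverted index built in one enumerate pass (word -> set of window indices, via setdefault), followed by a comprehension taking each set's size.
import Mathlib
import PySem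

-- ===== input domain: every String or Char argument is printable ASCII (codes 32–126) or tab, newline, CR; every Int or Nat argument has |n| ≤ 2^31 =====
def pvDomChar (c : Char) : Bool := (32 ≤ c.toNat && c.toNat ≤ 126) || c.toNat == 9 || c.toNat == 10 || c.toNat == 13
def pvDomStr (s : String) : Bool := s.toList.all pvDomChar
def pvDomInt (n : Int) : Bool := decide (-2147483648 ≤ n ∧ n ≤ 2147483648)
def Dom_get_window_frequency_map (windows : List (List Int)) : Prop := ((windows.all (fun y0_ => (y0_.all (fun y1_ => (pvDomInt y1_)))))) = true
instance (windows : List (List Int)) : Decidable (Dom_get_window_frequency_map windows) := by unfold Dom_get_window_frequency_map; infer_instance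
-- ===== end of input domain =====

-- B replaces A's running counts with an inverted index (word → set of window
-- indices) built in one pass, returning each set's size; same cost, different
-- data structure (objective: alternative).

-- ===== PORT A =====
-- the body of A's inner loop, on one element window[i] and state (freq map, appeared)
def gwfmStepA (st : PySem.Dict Int Int × PySem.Set Int) (w : Int) :
    PySem.Dict Int Int × PySem.Set Int :=
  if PySem.Set.contains st.2 w then st
  else if st.1.contains w then (st.1.insert w (st.1.getD w 0 + 1), PySem.Set.add st.2 w)
  else (st.1.insert w 1, PySem.Set.add st.2 w)

-- A's per-window loop: 'for i in range(len(window)):' over window[i]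
def gwfmWindowA (d : PySem.Dict Int Int) (window : List Int) : PySem.Dict Int Int :=
  ((PySem.List.pyRange 0 (PySem.List.len window)).foldl
    (fun st i => gwfmStepA st (PySem.List.pyGetD window i 0))
    (d, PySem.Set.empty)).1

def get_window_frequency_map (windows : List (List Int)) : List (Int × Int) :=
  (windows.foldl gwfmWindowA PySem.Dict.empty).items

-- ===== PORT B =====
-- 'word_to_windows.setdefault(word, set()).add(index)'
def gwfmStepB (index : Nat) (d : PySem.Dict Int (PySem.Set Nat)) (word : Int) :
    PySem.Dict Int (PySem.Set Nat) :=
  d.modify word PySem.Set.empty (fun s => PySem.Set.add s index)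

-- 'for index, window in enumerate(windows):' as recursion carrying the index
def gwfmBuild : Nat → List (List Int) → PySem.Dict Int (PySem.Set Nat) →
    PySem.Dict Int (PySem.Set Nat)
  | _, [], d => d
  | index, window :: rest, d => gwfmBuild (index + 1) rest (window.foldl (gwfmStepB index) d)

def get_window_frequency_map_alt (windows : List (List Int)) : List (Int × Int) :=
  (gwfmBuild 0 windows PySem.Dict.empty).items.map (fun p => (p.1, (p.2.length : Int)))

-- ===== PRECONDITION & SPEC =====
def Spec_get_window_frequency_map (windows : List (List Int)) (out : List (Int × Int)) : Prop := out = get_window_frequency_map_alt windows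
instance (windows : List (List Int)) (out : List (Int × Int)) : Decidable (Spec_get_window_frequency_map windows out) := by unfold Spec_get_window_frequency_map; infer_instance

-- ===== CLAIM (what is proved, stated in full; the proofs are below) =====
def Claim_equal_get_window_frequency_map : Prop := ∀ (windows : List (List Int)), Dom_get_window_frequency_map windows → Spec_get_window_frequency_map windows (get_window_frequency_map windows)

-- ===== LEMMAS AND PROOFS =====

-- the items of A's dict are the items of B's index with each set replaced by its size
def gwfmLen (p : Int × PySem.Set Nat) : Int × Int := (p.1, (p.2.length : Int))

-- invariant inside one window: n = current window index, ap = A's 'appeared'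
def gwfmInvW (n : Nat) (dA : PySem.Dict Int Int) (ap : PySem.Set Int)
    (dB : PySem.Dict Int (PySem.Set Nat)) : Prop :=
  dA.items = dB.items.map gwfmLen
  ∧ dB.keys.Nodup
  ∧ (∀ p ∈ dB.items, (∀ j ∈ p.2, j ≤ n) ∧ (n ∈ p.2 ↔ p.1 ∈ ap))
  ∧ (∀ x ∈ ap, dB.contains x = true)

-- invariant between windows: n = number of windows processed so far
def gwfmInv (n : Nat) (dA : PySem.Dict Int Int) (dB : PySem.Dict Int (PySem.Set Nat)) : Prop :=
  dA.items = dB.items.map gwfmLen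
  ∧ dB.keys.Nodup
  ∧ (∀ p ∈ dB.items, ∀ j ∈ p.2, j < n)

lemma gwfm_step (n : Nat) (dA : PySem.Dict Int Int) (ap : PySem.Set Int)
    (dB : PySem.Dict Int (PySem.Set Nat)) (x : Int) (h : gwfmInvW n dA ap dB) :
    gwfmInvW n (gwfmStepA (dA, ap) x).1 (gwfmStepA (dA, ap) x).2 (gwfmStepB n dB x) := by
  obtain ⟨h1, h2, h3, h4⟩ := h
  have hkeys : dA.keys = dB.keys := by
    show dA.items.map Prod.fst = dB.items.map Prod.fst
    rw [h1, List.map_map]; rfl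
  have hmod : gwfmStepB n dB x = dB.insert x (PySem.Set.add (dB.getD x PySem.Set.empty) n) := rfl
  by_cases hap : x ∈ ap
  · have hstA : gwfmStepA (dA, ap) x = (dA, ap) := by
      simp [gwfmStepA, hap]
    have hc : dB.contains x = true := h4 x hap
    obtain ⟨s, hs⟩ : ∃ s, dB.get? x = some s := by
      rw [PySem.Dict.contains_eq_isSome_get?] at hc
      exact Option.isSome_iff_exists.mp hc
    have hmem : (x, s) ∈ dB.items := PySem.Dict.mem_items_of_get?_eq_some dB hs
    have hns : n ∈ s := ((h3 _ hmem).2).mpr hap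
    have hB : gwfmStepB n dB x = dB := by
      rw [hmod, PySem.Dict.getD_of_get?_eq_some _ _ hs]
      have hadd : PySem.Set.add s n = s := by simp [PySem.Set.add, hns]
      rw [hadd]
      apply PySem.Dict.ext
      rw [PySem.Dict.items_insert_of_contains _ _ hc]
      have hpt : ∀ p ∈ dB.items, (if (p.1 == x) = true then (x, s) else p) = id p := by
        rintro ⟨k, v⟩ hp
        by_cases hkx : k = x
        · subst hkx
          have := PySem.Dict.get?_of_mem_items dB hp h2
          rw [hs] at this
          have hv : s = v := by injection this
          subst hv
          simp
        · simp [hkx]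
      rw [List.map_congr_left hpt, List.map_id]
    rw [hstA, hB]; exact ⟨h1, h2, h3, h4⟩
  · have hapc : PySem.Set.contains ap x = false := by
      rw [Bool.eq_false_iff]
      intro hcc; exact hap ((PySem.Set.contains_iff ap x).mp hcc)
    have hcAB : dA.contains x = dB.contains x := by
      rw [PySem.Dict.contains_eq_decide_mem_keys, PySem.Dict.contains_eq_decide_mem_keys, hkeys]
    have hmemadd : ∀ y : Int, y ∈ PySem.Set.add ap x ↔ y ∈ ap ∨ y = x := fun y =>
      PySem.Set.mem_add ap x y
    by_cases hc : dB.contains x = true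
    · obtain ⟨s, hs⟩ : ∃ s, dB.get? x = some s := by
        rw [PySem.Dict.contains_eq_isSome_get?] at hc
        exact Option.isSome_iff_exists.mp hc
      have hmem : (x, s) ∈ dB.items := PySem.Dict.mem_items_of_get?_eq_some dB hs
      have hnotns : n ∉ s := fun hn => hap (((h3 _ hmem).2).mp hn)
      have hadd : PySem.Set.add s n = s ++ [n] := by simp [PySem.Set.add, hnotns]
      have hAnodup : dA.keys.Nodup := hkeys ▸ h2
      have hmemA : (x, (s.length : Int)) ∈ dA.items := by
        rw [h1]; exact List.mem_map_of_mem hmem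
      have hgDA : dA.getD x 0 = (s.length : Int) :=
        PySem.Dict.getD_of_mem_items dA hmemA hAnodup 0
      have hcA : dA.contains x = true := by rw [hcAB]; exact hc
      have hstA : gwfmStepA (dA, ap) x
          = (dA.insert x (dA.getD x 0 + 1), PySem.Set.add ap x) := by
        simp [gwfmStepA, hap, hcA]
      have hB : gwfmStepB n dB x = dB.insert x (s ++ [n]) := by
        rw [hmod, PySem.Dict.getD_of_get?_eq_some _ _ hs, hadd]
      rw [hstA, hB]
      refine ⟨?_, ?_, ?_, ?_⟩
      · show (dA.insert x (dA.getD x 0 + 1)).items = _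
        rw [PySem.Dict.items_insert_of_contains _ _ hcA,
            PySem.Dict.items_insert_of_contains _ _ hc, h1, List.map_map, List.map_map]
        apply List.map_congr_left
        rintro ⟨k, v⟩ hp
        by_cases hkx : k = x
        · subst hkx
          have := PySem.Dict.get?_of_mem_items dB hp h2
          rw [hs] at this
          have hv : s = v := by injection this
          subst hv
          simp [gwfmLen, hgDA]
        · simp [gwfmLen, hkx]
      · rw [PySem.Dict.keys_insert_of_contains _ _ hc]; exact h2
      · intro q hq
        rw [PySem.Dict.items_insert_of_contains _ _ hc] at hq
        obtain ⟨p, hp, rfl⟩ := List.mem_map.mp hq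
        by_cases hkx : p.1 = x
        · obtain ⟨k, v⟩ := p
          simp only at hkx; subst hkx
          have := PySem.Dict.get?_of_mem_items dB hp h2
          rw [hs] at this
          have hv : s = v := by injection this
          subst hv
          simp only [BEq.rfl, if_true]
          refine ⟨?_, ?_⟩
          · intro j hj
            rcases List.mem_append.mp hj with hj | hj
            · exact (h3 _ hp).1 j hj
            · simp at hj; omega
          · simp [hmemadd]
        · have hne : (p.1 == x) = false := by simp [hkx]
          simp only [hne, Bool.false_eq_true, if_false]
          refine ⟨(h3 _ hp).1, ?_⟩
          rw [(h3 _ hp).2, hmemadd]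
          simp [hkx]
      · intro y hy
        rw [PySem.Dict.contains_insert]
        rcases (hmemadd y).mp hy with hy | rfl
        · rw [h4 y hy]; simp
        · simp
    · have hcB : dB.contains x = false := by simp [hc]
      have hcA : dA.contains x = false := by rw [hcAB]; exact hcB
      have hxnk : x ∉ dB.keys := fun hk => hc ((PySem.Dict.contains_iff_mem_keys dB x).mpr hk)
      have hstA : gwfmStepA (dA, ap) x = (dA.insert x 1, PySem.Set.add ap x) := by
        simp [gwfmStepA, hap, hcA]
      have hB : gwfmStepB n dB x = dB.insert x [n] := by
        rw [hmod, PySem.Dict.getD_of_not_contains _ _ hcB]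
        rfl
      rw [hstA, hB]
      refine ⟨?_, ?_, ?_, ?_⟩
      · show (dA.insert x 1).items = _
        rw [PySem.Dict.items_insert_of_not_contains _ _ hcA,
            PySem.Dict.items_insert_of_not_contains _ _ hcB, List.map_append, h1]
        rfl
      · rw [PySem.Dict.keys_insert_of_not_contains _ _ hcB]
        simp [List.nodup_append, h2]
        exact fun a ha hax => hxnk (hax ▸ ha)
      · intro q hq
        rw [PySem.Dict.items_insert_of_not_contains _ _ hcB] at hq
        rcases List.mem_append.mp hq with hq | hq
        · have hqk : q.1 ≠ x := by
            intro he
            exact hxnk (he ▸ PySem.Dict.mem_keys_of_mem_items dB hq)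
          refine ⟨(h3 _ hq).1, ?_⟩
          rw [(h3 _ hq).2, hmemadd]
          simp [hqk]
        · simp at hq; subst hq
          refine ⟨by simp, ?_⟩
          simp [hmemadd]
      · intro y hy
        rw [PySem.Dict.contains_insert]
        rcases (hmemadd y).mp hy with hy | rfl
        · rw [h4 y hy]; simp
        · simp

lemma gwfm_inner (n : Nat) (window : List Int) :
    ∀ (dA : PySem.Dict Int Int) (ap : PySem.Set Int) (dB : PySem.Dict Int (PySem.Set Nat)),
      gwfmInvW n dA ap dB →
      gwfmInvW n (window.foldl gwfmStepA (dA, ap)).1 (window.foldl gwfmStepA (dA, ap)).2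
        (window.foldl (gwfmStepB n) dB) := by
  induction window with
  | nil => intro dA ap dB h; exact h
  | cons x xs ih =>
    intro dA ap dB h
    have h' := gwfm_step n dA ap dB x h
    simpa using ih (gwfmStepA (dA, ap) x).1 (gwfmStepA (dA, ap) x).2 (gwfmStepB n dB x) h'

lemma gwfm_windowA_eq (d : PySem.Dict Int Int) (window : List Int) :
    gwfmWindowA d window = (window.foldl gwfmStepA (d, PySem.Set.empty)).1 := by
  unfold gwfmWindowA
  rw [PySem.List.foldl_pyRange_pyGetD window 0 gwfmStepA (d, PySem.Set.empty) (by norm_num)]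
  simp

lemma gwfm_outer (ws : List (List Int)) :
    ∀ (n : Nat) (dA : PySem.Dict Int Int) (dB : PySem.Dict Int (PySem.Set Nat)),
      gwfmInv n dA dB →
      gwfmInv (n + ws.length) (ws.foldl gwfmWindowA dA) (gwfmBuild n ws dB) := by
  induction ws with
  | nil => intro n dA dB h; simpa using h
  | cons w rest ih =>
    intro n dA dB h
    obtain ⟨h1, h2, h3⟩ := h
    have hW : gwfmInvW n dA PySem.Set.empty dB := by
      refine ⟨h1, h2, fun p hp => ⟨fun j hj => le_of_lt (h3 p hp j hj), ?_⟩, by simp [PySem.Set.empty]⟩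
      constructor
      · intro hn; exact absurd (h3 p hp n hn) (lt_irrefl n)
      · intro hx; simp [PySem.Set.empty] at hx
    have h' := gwfm_inner n w dA PySem.Set.empty dB hW
    obtain ⟨g1, g2, g3, _⟩ := h'
    have hnext : gwfmInv (n + 1) (gwfmWindowA dA w) (w.foldl (gwfmStepB n) dB) := by
      rw [gwfm_windowA_eq]
      exact ⟨g1, g2, fun p hp j hj => Nat.lt_succ_of_le ((g3 p hp).1 j hj)⟩
    have := ih (n + 1) (gwfmWindowA dA w) (w.foldl (gwfmStepB n) dB) hnext
    simpa [gwfmBuild, Nat.add_comm, Nat.add_assoc, Nat.add_left_comm] using this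

-- ===== VERDICT (by name: the statement is the Claim_ definition above) =====
theorem get_window_frequency_map_spec : Claim_equal_get_window_frequency_map := by
  intro windows _
  unfold Spec_get_window_frequency_map get_window_frequency_map get_window_frequency_map_alt
  have h0 : gwfmInv 0 PySem.Dict.empty PySem.Dict.empty := by
    refine ⟨by simp [PySem.Dict.empty], by simp [PySem.Dict.empty, PySem.Dict.keys], ?_⟩
    intro p hp; simp [PySem.Dict.empty] at hp
  have := gwfm_outer windows 0 PySem.Dict.empty PySem.Dict.empty h0
  exact this.1
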